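-- pv_equiv track=rewrite | github.com/PapenfussLab/proteindj | scripts/generate_contigs.py | find_continuous_ranges
-- ===== SOURCE A (Python) =====
-- def find_continuous_ranges(residue_list):
--     """
--     Find continuous residue ranges, breaking at gaps (missing residues).
--
--     Args:
--         residue_list: Sorted list of residue numbers
--
--     Returns:
--         list: List of tuples (start, end) representing continuous ranges
--     """
--     if not residue_list:
--         return []
--
--     ranges = []
--     start = residue_list[0]
--     prev = residue_list[0]
--
--     for resnum in residue_list[1:]:
--         # If there's a gap of more than 1, start a new range
--         if resnum != prev + 1:
--             ranges.append((start, prev))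
--             start = resnum
--         prev = resnum
--
--     # Add the final range
--     ranges.append((start, prev))
--
--     return ranges
-- ===== SOURCE B (Python) =====
-- def find_continuous_ranges(residue_list):
--     """
--     Find continuous residue ranges, breaking at gaps (missing residues).
--
--     Two-pass boundary method: first collect the indices where a gap occurs,
--     then cut the list at those boundaries and emit (first, last) of each piece.
--     """
--     n = len(residue_list)
--     if n == 0:
--         return []
--     gaps = [i for i in range(1, n) if residue_list[i] != residue_list[i - 1] + 1]
--     bounds = [0] + gaps + [n]
--     return [(residue_list[s], residue_list[e - 1]) for s, e in zip(bounds, bounds[1:])]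
-- ===== Notes on version B (the rewrite author's own statement) =====
-- stated objective: alternative
-- what changed: Replaces the single-pass start/prev state machine with a two-pass boundary method: one pass collects the gap indices, then ranges are built from consecutive pairs of the boundary list (zero, the gap indices, the length).
import Mathlib
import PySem

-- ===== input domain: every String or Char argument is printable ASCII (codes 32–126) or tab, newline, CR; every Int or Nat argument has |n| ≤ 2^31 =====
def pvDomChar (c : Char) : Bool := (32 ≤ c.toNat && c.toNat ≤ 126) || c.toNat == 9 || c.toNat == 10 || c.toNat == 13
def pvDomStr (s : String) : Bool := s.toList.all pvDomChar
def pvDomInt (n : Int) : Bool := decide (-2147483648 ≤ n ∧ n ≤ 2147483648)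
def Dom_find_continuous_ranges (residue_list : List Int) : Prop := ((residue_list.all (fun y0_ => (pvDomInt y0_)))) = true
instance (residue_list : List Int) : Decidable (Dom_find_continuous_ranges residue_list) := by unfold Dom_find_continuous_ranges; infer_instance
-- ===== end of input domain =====

-- B replaces A's single-pass start/prev state machine by a two-pass boundary method
-- (collect gap indices, then cut at the boundaries); alternative decomposition, same cost.

-- ===== PORT A =====
def find_continuous_ranges (residue_list : List Int) : List (Int × Int) :=
  match residue_list with
  | [] => []
  | x :: xs =>
    -- ranges = [], start = residue_list[0], prev = residue_list[0];
    -- for resnum in residue_list[1:] (= xs): …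
    let st := xs.foldl
      (fun (acc : List (Int × Int) × Int × Int) resnum =>
        if resnum ≠ acc.2.2 + 1 then (acc.1 ++ [(acc.2.1, acc.2.2)], resnum, resnum)
        else (acc.1, acc.2.1, resnum))
      ([], x, x)
    st.1 ++ [(st.2.1, st.2.2)]

-- ===== PORT B =====
-- residue_list[i] with i always in range (0 ≤ i < n at every use site), so the default is never taken: exact.
def pyIdx (l : List Int) (i : Int) : Int := PySem.List.pyGetD l i 0

def find_continuous_ranges_alt (residue_list : List Int) : List (Int × Int) :=
  let n : Int := residue_list.length
  if n = 0 then []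
  else
    let gaps := (PySem.List.pyRange 1 n 1).filter
      (fun i => pyIdx residue_list i ≠ pyIdx residue_list (i - 1) + 1)
    let bounds := 0 :: (gaps ++ [n])
    (bounds.zip (bounds.drop 1)).map
      (fun se => (pyIdx residue_list se.1, pyIdx residue_list (se.2 - 1)))

-- ===== PRECONDITION & SPEC =====
def Spec_find_continuous_ranges (residue_list : List Int) (out : List (Int × Int)) : Prop := out = find_continuous_ranges_alt residue_list
instance (residue_list : List Int) (out : List (Int × Int)) : Decidable (Spec_find_continuous_ranges residue_list out) := by unfold Spec_find_continuous_ranges; infer_instance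

-- ===== CLAIM (what is proved, stated in full; the proofs are below) =====
def Claim_equal_find_continuous_ranges : Prop := ∀ (residue_list : List Int), Dom_find_continuous_ranges residue_list → Spec_find_continuous_ranges residue_list (find_continuous_ranges residue_list)

-- ===== LEMMAS AND PROOFS =====

-- proof-side abbreviations for the pieces of B
def gapsOf (l : List Int) : List Int :=
  (PySem.List.pyRange 1 (l.length : Int) 1).filter
    (fun i => pyIdx l i ≠ pyIdx l (i - 1) + 1)

def pairsOf (l : List Int) (bs : List Int) : List (Int × Int) :=
  (bs.zip (bs.drop 1)).map (fun se => (pyIdx l se.1, pyIdx l (se.2 - 1)))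

def lastB (a : Int) (gs : List Int) : Int := gs.foldl (fun _ g => g) a

theorem lastB_snoc (a : Int) (gs : List Int) (b : Int) : lastB a (gs ++ [b]) = b := by
  simp [lastB]

theorem lastB_cons (a g : Int) (gs : List Int) : lastB a (g :: gs) = lastB g gs := rfl

theorem lastB_mem (a : Int) (gs : List Int) : lastB a gs = a ∨ lastB a gs ∈ gs := by
  induction gs generalizing a with
  | nil => left; rfl
  | cons g gs ih =>
    rcases ih g with h | h
    · right; rw [lastB_cons, h]; simp
    · right; rw [lastB_cons]; simp [h]

theorem pyIdx_stable (l : List Int) (y : Int) (i : Int) (h0 : 0 ≤ i) (h1 : i < (l.length : Int)) :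
    pyIdx (l ++ [y]) i = pyIdx l i := by
  have hlen : i < ((l ++ [y]).length : Int) := by simp; omega
  rw [pyIdx, pyIdx, PySem.List.pyGetD_eq_getElem _ 0 h0 hlen,
      PySem.List.pyGetD_eq_getElem _ 0 h0 h1]
  have : i.toNat < l.length := by omega
  exact List.getElem_append_left ..

theorem pyIdx_append_self (l : List Int) (y : Int) : pyIdx (l ++ [y]) (l.length : Int) = y := by
  have h0 : (0:Int) ≤ (l.length : Int) := by positivity
  have h1 : (l.length : Int) < ((l ++ [y]).length : Int) := by simp
  rw [pyIdx, PySem.List.pyGetD_eq_getElem _ 0 h0 h1]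
  simp

theorem gapsOf_snoc (l : List Int) (y : Int) (h : l ≠ []) :
    gapsOf (l ++ [y]) =
      gapsOf l ++ (if y ≠ pyIdx l ((l.length : Int) - 1) + 1 then [(l.length : Int)] else []) := by
  have hn : 1 ≤ (l.length : Int) := by
    have := List.length_pos_iff.mpr h; omega
  have hcast : (((l ++ [y]).length : Nat) : Int) = (l.length : Int) + 1 := by simp
  rw [gapsOf, hcast, PySem.List.pyRange_one_succ_right (by omega), List.filter_append]
  congr 1
  · rw [gapsOf]
    apply List.filter_congr
    intro i hi
    have hmem := (PySem.List.mem_pyRange_one).mp hi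
    rw [pyIdx_stable l y i (by omega) (by omega), pyIdx_stable l y (i - 1) (by omega) (by omega)]
  · rw [List.filter_singleton]
    have e1 : pyIdx (l ++ [y]) (l.length : Int) = y := pyIdx_append_self l y
    have e2 : pyIdx (l ++ [y]) ((l.length : Int) - 1) = pyIdx l ((l.length : Int) - 1) :=
      pyIdx_stable l y _ (by omega) (by omega)
    simp only [e1, e2]
    by_cases hy : y ≠ pyIdx l ((l.length : Int) - 1) + 1 <;> simp [hy]

theorem pairsOf_cons_cons (l : List Int) (b1 b2 : Int) (rest : List Int) :
    pairsOf l (b1 :: b2 :: rest) =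
      (pyIdx l b1, pyIdx l (b2 - 1)) :: pairsOf l (b2 :: rest) := by
  simp [pairsOf]

theorem pairsOf_snoc (l : List Int) (a : Int) (gs : List Int) (b : Int) :
    pairsOf l ((a :: gs) ++ [b]) =
      pairsOf l (a :: gs) ++ [(pyIdx l (lastB a gs), pyIdx l (b - 1))] := by
  induction gs generalizing a with
  | nil => simp [pairsOf, lastB]
  | cons g gs ih =>
    rw [List.cons_append, List.cons_append, pairsOf_cons_cons l a g (gs ++ [b]),
        ← List.cons_append, ih g, pairsOf_cons_cons l a g gs, lastB_cons]
    simp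

theorem pairsOf_stable (l : List Int) (y : Int) (bs : List Int)
    (h : ∀ b ∈ bs, 0 ≤ b ∧ b < (l.length : Int)) (h2 : ∀ b ∈ bs.drop 1, 1 ≤ b) :
    pairsOf (l ++ [y]) bs = pairsOf l bs := by
  rw [pairsOf, pairsOf]
  apply List.map_congr_left
  intro p hp
  obtain ⟨hp1, hp2⟩ := List.of_mem_zip hp
  have hb1 := h p.1 hp1
  have hb2 := h p.2 (List.mem_of_mem_drop hp2)
  have hb2' := h2 p.2 hp2
  rw [pyIdx_stable l y p.1 hb1.1 hb1.2, pyIdx_stable l y (p.2 - 1) (by omega) (by omega)]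

theorem mem_gapsOf (l : List Int) (i : Int) (h : i ∈ gapsOf l) :
    1 ≤ i ∧ i < (l.length : Int) := by
  rw [gapsOf] at h
  exact (PySem.List.mem_pyRange_one).mp (List.mem_of_mem_filter h)

-- the loop invariant: after folding the tail, A's state is exactly B's data
theorem fold_inv (x : Int) (xs : List Int) :
    xs.foldl
      (fun (acc : List (Int × Int) × Int × Int) resnum =>
        if resnum ≠ acc.2.2 + 1 then (acc.1 ++ [(acc.2.1, acc.2.2)], resnum, resnum)
        else (acc.1, acc.2.1, resnum))
      ([], x, x)
    = (pairsOf (x :: xs) (0 :: gapsOf (x :: xs)),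
       pyIdx (x :: xs) (lastB 0 (gapsOf (x :: xs))),
       pyIdx (x :: xs) (((x :: xs).length : Int) - 1)) := by
  induction xs using List.reverseRecOn with
  | nil =>
    have hr : PySem.List.pyRange 1 ((([x] : List Int).length : Int)) 1 = [] :=
      PySem.List.pyRange_one_eq_nil (by simp)
    simp [gapsOf, pairsOf, lastB, pyIdx]
  | append_singleton zs y ih =>
    have hcons : x :: (zs ++ [y]) = (x :: zs) ++ [y] := by simp
    set l := x :: zs with hl
    have hne : l ≠ [] := by simp [hl]
    have hn : 1 ≤ (l.length : Int) := by
      have := List.length_pos_iff.mpr hne; omega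
    have hGmem : ∀ b ∈ (0 : Int) :: gapsOf l, 0 ≤ b ∧ b < (l.length : Int) := by
      intro b hb
      rcases List.mem_cons.mp hb with h | h
      · omega
      · have := mem_gapsOf l b h; omega
    have hGdrop : ∀ b ∈ ((0 : Int) :: gapsOf l).drop 1, 1 ≤ b := by
      intro b hb
      simp only [List.drop_one, List.tail_cons] at hb
      exact (mem_gapsOf l b hb).1
    have hlast : 0 ≤ lastB 0 (gapsOf l) ∧ lastB 0 (gapsOf l) < (l.length : Int) := by
      rcases lastB_mem 0 (gapsOf l) with h | h
      · omega
      · have := mem_gapsOf l _ h; omega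
    have h3 : (((l ++ [y]).length : Nat) : Int) - 1 = (l.length : Int) := by simp
    rw [List.foldl_append, ih, hcons, gapsOf_snoc l y hne]
    simp only [List.foldl_cons, List.foldl_nil]
    by_cases hy : y ≠ pyIdx l ((l.length : Int) - 1) + 1
    · rw [if_pos hy]
      simp only [if_pos hy]
      rw [show (0 : Int) :: (gapsOf l ++ [(l.length : Int)]) =
            ((0 : Int) :: gapsOf l) ++ [(l.length : Int)] by simp,
          pairsOf_snoc, pairsOf_stable l y _ hGmem hGdrop,
          pyIdx_stable l y _ hlast.1 hlast.2,
          pyIdx_stable l y _ (by omega : (0:Int) ≤ (l.length : Int) - 1) (by omega),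
          lastB_snoc, pyIdx_append_self, h3, pyIdx_append_self]
    · rw [if_neg hy]
      simp only [if_neg hy, List.append_nil]
      rw [pairsOf_stable l y _ hGmem hGdrop,
          pyIdx_stable l y _ hlast.1 hlast.2, h3, pyIdx_append_self]

theorem alt_eq (x : Int) (xs : List Int) :
    find_continuous_ranges_alt (x :: xs) =
      pairsOf (x :: xs) (((0 : Int) :: gapsOf (x :: xs)) ++ [((x :: xs).length : Int)]) := by
  have hne : ¬((((x :: xs).length : Nat) : Int) = 0) := by simp; omega
  simp only [find_continuous_ranges_alt]
  rw [if_neg hne]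
  simp only [pairsOf, gapsOf, List.cons_append]

-- ===== VERDICT (by name: the statement is the Claim_ definition above) =====
theorem find_continuous_ranges_spec : Claim_equal_find_continuous_ranges := by
  intro l _
  unfold Spec_find_continuous_ranges
  cases l with
  | nil => simp [find_continuous_ranges, find_continuous_ranges_alt]
  | cons x xs =>
    simp only [find_continuous_ranges]
    rw [fold_inv, alt_eq, pairsOf_snoc]
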